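-- pv_equiv track=rewrite | github.com/rhrlima/cbioge | problems/segmentation.py | _reshape_mapping
-- ===== SOURCE A (Python) =====
-- def _reshape_mapping(phenotype):
--
--     new_mapping = []
--
--     index = 0
--     while index < len(phenotype):
--         block = phenotype[index]
--         if block == 'conv':
--             end = index+6
--         elif block == 'avgpool' or block == 'maxpool':
--             end = index+4
--         elif block in ['push', 'bridge']:
--             end = index+1
--         else:
--             end = index+2
--
--         new_mapping.append(phenotype[index:end])
--         phenotype = phenotype[end:]
--
--     return new_mapping
-- ===== SOURCE B (Python) =====
-- _BLOCK_SIZES = {'conv': 6, 'avgpool': 4, 'maxpool': 4, 'push': 1, 'bridge': 1}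
--
-- def _reshape_mapping(phenotype):
--     out = []
--     i = 0
--     n = len(phenotype)
--     while i < n:
--         k = _BLOCK_SIZES.get(phenotype[i], 2)
--         out.append(phenotype[i:i+k])
--         i += k
--     return out
-- ===== Notes on version B (the rewrite author's own statement) =====
-- stated objective: faster
-- what changed: Replaces A's repeated re-slicing of the tail of the list (phenotype = phenotype[end:] each iteration) by a single pass with an advancing index pointer and a size lookup table, slicing out each block directly from the original list.
import Mathlib
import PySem

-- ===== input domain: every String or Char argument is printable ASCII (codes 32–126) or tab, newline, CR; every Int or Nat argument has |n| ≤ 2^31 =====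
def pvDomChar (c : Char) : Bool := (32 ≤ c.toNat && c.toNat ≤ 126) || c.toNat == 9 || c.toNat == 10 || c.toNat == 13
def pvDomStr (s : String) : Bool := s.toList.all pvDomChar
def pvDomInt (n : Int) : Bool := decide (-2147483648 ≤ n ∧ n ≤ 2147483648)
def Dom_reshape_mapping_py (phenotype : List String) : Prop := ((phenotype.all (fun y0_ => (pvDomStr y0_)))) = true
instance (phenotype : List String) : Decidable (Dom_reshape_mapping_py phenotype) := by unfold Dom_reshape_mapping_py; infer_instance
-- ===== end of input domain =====

-- B replaces A's repeated re-slicing of the remaining tail by one pass with an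
-- advancing index and a block-size lookup table (objective: faster).

-- ===== PORT A =====
-- A's if/elif chain computing end - index (index is never incremented, so it stays 0
-- and end - index is the block length); factored out only to cite it in decreasing_by.
def pvBlockEnd (block : String) : Nat :=
  if block == "conv" then 6
  else if block == "avgpool" || block == "maxpool" then 4
  else if block == "push" || block == "bridge" then 1
  else 2

theorem pvBlockEnd_pos (b : String) : 1 ≤ pvBlockEnd b := by
  unfold pvBlockEnd; split_ifs <;> omega

-- A's while loop: each iteration reads phenotype[0], appends phenotype[0:end] and
-- rebinds phenotype = phenotype[end:]; both slices have bounds 0 ≤ end, so they are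
-- exactly List.take / List.drop.
def reshape_mapping_py_go : List String → List (List String) → List (List String)
  | [], new_mapping => new_mapping
  | block :: rest, new_mapping =>
    reshape_mapping_py_go ((block :: rest).drop (pvBlockEnd block))
      (new_mapping ++ [(block :: rest).take (pvBlockEnd block)])
  termination_by l _ => l.length
  decreasing_by
    have := pvBlockEnd_pos block
    simp only [List.length_drop, List.length_cons]; omega

def reshape_mapping_py (phenotype : List String) : List (List String) :=
  reshape_mapping_py_go phenotype []

-- ===== PORT B =====
def pvBlockSizes : PySem.Dict String Nat :=
  PySem.Dict.ofList [("conv", 6), ("avgpool", 4), ("maxpool", 4), ("push", 1), ("bridge", 1)]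

-- every table entry and the default 2 are ≥ 1; cited by decreasing_by below
theorem pvBlockSizes_items : pvBlockSizes.items =
    [("conv", 6), ("avgpool", 4), ("maxpool", 4), ("push", 1), ("bridge", 1)] := rfl

theorem pvBlockSizes_pos (b : String) : 1 ≤ pvBlockSizes.getD b 2 := by
  simp only [PySem.Dict.getD, PySem.Dict.get?, pvBlockSizes_items, List.find?]
  by_cases h1 : b = "conv"; · subst h1; decide
  by_cases h2 : b = "avgpool"; · subst h2; decide
  by_cases h3 : b = "maxpool"; · subst h3; decide
  by_cases h4 : b = "push"; · subst h4; decide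
  by_cases h5 : b = "bridge"; · subst h5; decide
  simp only [beq_eq_false_iff_ne.mpr (Ne.symm h1), beq_eq_false_iff_ne.mpr (Ne.symm h2),
    beq_eq_false_iff_ne.mpr (Ne.symm h3), beq_eq_false_iff_ne.mpr (Ne.symm h4),
    beq_eq_false_iff_ne.mpr (Ne.symm h5)]
  decide

-- B's while loop: advancing index i over the fixed original list; phenotype[i:i+k]
-- (0 ≤ i ≤ i+k) is (drop i).take k exactly; Source B's local k is written inline.
def reshape_mapping_py_alt_go (phenotype : List String) (i : Nat) : List (List String) :=
  if h : i < phenotype.length then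
    ((phenotype.drop i).take (pvBlockSizes.getD phenotype[i] 2)) ::
      reshape_mapping_py_alt_go phenotype (i + pvBlockSizes.getD phenotype[i] 2)
  else []
  termination_by phenotype.length - i
  decreasing_by have := pvBlockSizes_pos phenotype[i]; omega

def reshape_mapping_py_alt (phenotype : List String) : List (List String) :=
  reshape_mapping_py_alt_go phenotype 0

-- ===== PRECONDITION & SPEC =====
def Spec_reshape_mapping_py (phenotype : List String) (out : List (List String)) : Prop := out = reshape_mapping_py_alt phenotype
instance (phenotype : List String) (out : List (List String)) : Decidable (Spec_reshape_mapping_py phenotype out) := by unfold Spec_reshape_mapping_py; infer_instance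

-- ===== CLAIM (what is proved, stated in full; the proofs are below) =====
def Claim_equal_reshape_mapping_py : Prop := ∀ (phenotype : List String), Dom_reshape_mapping_py phenotype → Spec_reshape_mapping_py phenotype (reshape_mapping_py phenotype)

-- ===== LEMMAS AND PROOFS =====

-- B's dict lookup with default 2 computes exactly A's if/elif chain
theorem getD_eq_blockEnd (b : String) : pvBlockSizes.getD b 2 = pvBlockEnd b := by
  simp only [PySem.Dict.getD, PySem.Dict.get?, pvBlockSizes_items, List.find?, pvBlockEnd]
  by_cases h1 : b = "conv"; · subst h1; decide
  by_cases h2 : b = "avgpool"; · subst h2; decide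
  by_cases h3 : b = "maxpool"; · subst h3; decide
  by_cases h4 : b = "push"; · subst h4; decide
  by_cases h5 : b = "bridge"; · subst h5; decide
  simp only [beq_eq_false_iff_ne.mpr (Ne.symm h1), beq_eq_false_iff_ne.mpr (Ne.symm h2),
    beq_eq_false_iff_ne.mpr (Ne.symm h3), beq_eq_false_iff_ne.mpr (Ne.symm h4),
    beq_eq_false_iff_ne.mpr (Ne.symm h5), beq_eq_false_iff_ne.mpr h1,
    beq_eq_false_iff_ne.mpr h2, beq_eq_false_iff_ne.mpr h3,
    beq_eq_false_iff_ne.mpr h4, beq_eq_false_iff_ne.mpr h5]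
  rfl

-- A's loop accumulator distributes
theorem go_acc : ∀ (n : Nat) (l : List String), l.length ≤ n → ∀ acc,
    reshape_mapping_py_go l acc = acc ++ reshape_mapping_py_go l []
  | _, [], _, acc => by simp [reshape_mapping_py_go]
  | 0, _ :: _, h, acc => by simp at h
  | n + 1, b :: rest, h, acc => by
    rw [reshape_mapping_py_go, reshape_mapping_py_go]
    have hlen : ((b :: rest).drop (pvBlockEnd b)).length ≤ n := by
      have := pvBlockEnd_pos b
      simp only [List.length_drop, List.length_cons]
      simp only [List.length_cons] at h
      omega
    rw [go_acc n _ hlen, go_acc n _ hlen ([] ++ [(b :: rest).take (pvBlockEnd b)])]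
    simp

-- B's pointer loop computes A's loop on the dropped tail
theorem alt_go_eq : ∀ (n : Nat) (p : List String) (i : Nat), p.length - i ≤ n →
    reshape_mapping_py_alt_go p i = reshape_mapping_py_go (p.drop i) []
  | 0, p, i, hle => by
    rw [reshape_mapping_py_alt_go]
    have h : ¬ i < p.length := by omega
    simp only [dif_neg h]
    rw [List.drop_eq_nil_of_le (by omega), reshape_mapping_py_go]
  | n + 1, p, i, hle => by
    rw [reshape_mapping_py_alt_go]
    by_cases h : i < p.length
    · simp only [dif_pos h]
      have hpos := pvBlockSizes_pos p[i]
      rw [alt_go_eq n p (i + pvBlockSizes.getD p[i] 2) (by omega)]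
      have hdrop : p.drop i = p[i] :: p.drop (i + 1) := List.drop_eq_getElem_cons h
      conv_rhs => rw [hdrop, reshape_mapping_py_go]
      rw [← hdrop, getD_eq_blockEnd, List.drop_drop]
      rw [go_acc p.length (p.drop (i + pvBlockEnd p[i]))
        (by simp only [List.length_drop]; omega) ([] ++ [(p.drop i).take (pvBlockEnd p[i])])]
      simp
    · simp only [dif_neg h]
      rw [List.drop_eq_nil_of_le (by omega), reshape_mapping_py_go]

-- ===== VERDICT (by name: the statement is the Claim_ definition above) =====
theorem reshape_mapping_py_spec : Claim_equal_reshape_mapping_py := by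
  intro phenotype _
  unfold Spec_reshape_mapping_py reshape_mapping_py reshape_mapping_py_alt
  rw [alt_go_eq phenotype.length phenotype 0 (by omega), List.drop_zero]
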